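-- pv_equiv track=rewrite | github.com/yeonwoo1125/cospro-python-study | yeonwoo/answer/몬스터_공격하기.py | solution
-- ===== SOURCE A (Python) =====
-- def solution(attack, recovery, hp):
-- 	count = 0
-- 	while(True):
-- 		count += 1
-- 		hp -= attack
-- 		if hp <= 0:
-- 			return count
-- 		hp += recovery
-- 	return count
-- ===== SOURCE B (Python) =====
-- def solution(attack, recovery, hp):
--     # Closed form instead of simulating turns: one hit kills if hp <= attack;
--     # otherwise each extra turn removes a net (attack - recovery), so
--     # count = ceil((hp - recovery) / (attack - recovery)).
--     if hp <= attack: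
--         return 1
--     return -((-(hp - recovery)) // (attack - recovery))
-- ===== Notes on version B (the rewrite author's own statement) =====
-- stated objective: alternative
-- what changed: Replaces the turn-by-turn simulation loop with a ceiling-division closed form count = max(1, ceil((hp-recovery)/(attack-recovery))).
import Mathlib
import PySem

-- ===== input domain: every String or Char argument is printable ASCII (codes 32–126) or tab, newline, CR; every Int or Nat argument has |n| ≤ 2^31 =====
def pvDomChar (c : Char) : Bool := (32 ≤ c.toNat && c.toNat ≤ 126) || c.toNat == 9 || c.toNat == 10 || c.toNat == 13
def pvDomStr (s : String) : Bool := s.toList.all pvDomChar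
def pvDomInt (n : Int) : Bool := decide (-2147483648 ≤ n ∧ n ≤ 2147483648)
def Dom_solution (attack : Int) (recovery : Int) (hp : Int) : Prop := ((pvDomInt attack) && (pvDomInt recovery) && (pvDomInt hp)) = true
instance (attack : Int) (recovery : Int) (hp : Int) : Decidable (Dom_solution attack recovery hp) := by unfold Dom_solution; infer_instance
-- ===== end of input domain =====

-- B replaces A's turn-by-turn simulation by a ceiling-division closed form (objective: alternative).

-- ===== PORT A =====
-- A's 'while True' loop, step for step; the fuel only makes the recursion total
-- (it is never exhausted on inputs satisfying Pre_solution, where the loop returns).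
def solutionLoop (attack : Int) (recovery : Int) : Nat → Int → Int → Int
  | 0, _, count => count
  | fuel + 1, hp, count =>
      let count := count + 1
      let hp := hp - attack
      if hp ≤ 0 then count
      else solutionLoop attack recovery fuel (hp + recovery) count

def solution (attack : Int) (recovery : Int) (hp : Int) : Int :=
  solutionLoop attack recovery (hp + 8589934592).toNat hp 0

-- ===== PORT B =====
def solution_alt (attack : Int) (recovery : Int) (hp : Int) : Int :=
  if hp ≤ attack then 1
  else -(PySem.Int.floordiv (-(hp - recovery)) (attack - recovery))

-- ===== PRECONDITION & SPEC =====
-- Pre_ excludes exactly the inputs on which A's while-loop never returns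
-- (hp > attack together with attack ≤ recovery: hp never drops to 0).
def Pre_solution (attack : Int) (recovery : Int) (hp : Int) : Prop :=
  hp ≤ attack ∨ recovery < attack
instance (attack : Int) (recovery : Int) (hp : Int) : Decidable (Pre_solution attack recovery hp) := by unfold Pre_solution; infer_instance

def pvWitness_solution : Int × Int × Int := (5, 2, 10)

def Spec_solution (attack : Int) (recovery : Int) (hp : Int) (out : Int) : Prop := out = solution_alt attack recovery hp
instance (attack : Int) (recovery : Int) (hp : Int) (out : Int) : Decidable (Spec_solution attack recovery hp out) := by unfold Spec_solution; infer_instance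

-- ===== CLAIM (what is proved, stated in full; the proofs are below) =====
def Claim_equal_solution : Prop := ∀ (attack : Int) (recovery : Int) (hp : Int), Dom_solution attack recovery hp → Pre_solution attack recovery hp → Spec_solution attack recovery hp (solution attack recovery hp)

-- ===== LEMMAS AND PROOFS =====

-- ceiling-division bracket for B's formula
theorem pv_ceil_bounds (a b : Int) (hb : 0 < b) :
    (-(PySem.Int.floordiv (-a) b) - 1) * b < a ∧ a ≤ -(PySem.Int.floordiv (-a) b) * b :=
  (PySem.Int.neg_floordiv_neg_eq_iff_of_pos hb).mp rfl

-- B's value is at least 1 on Pre_, and alt (hp - (attack - recovery)) = alt hp - 1 when hp > attack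
theorem pv_alt_pos (attack recovery hp : Int) (hpre : Pre_solution attack recovery hp) :
    1 ≤ solution_alt attack recovery hp := by
  unfold solution_alt
  split_ifs with h
  · omega
  · rcases hpre with h' | h'
    · omega
    · have hb : (0:Int) < attack - recovery := by omega
      obtain ⟨h1, h2⟩ := pv_ceil_bounds (hp - recovery) (attack - recovery) hb
      nlinarith

theorem pv_alt_step (attack recovery hp : Int) (hrec : recovery < attack) (hhp : ¬ hp - attack ≤ 0) :
    solution_alt attack recovery hp = solution_alt attack recovery (hp - attack + recovery) + 1 := by
  have hb : (0:Int) < attack - recovery := by omega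
  obtain ⟨h1, h2⟩ := pv_ceil_bounds (hp - recovery) (attack - recovery) hb
  set c := -(PySem.Int.floordiv (-(hp - recovery)) (attack - recovery)) with hc
  have hgt : hp > attack := by omega
  have hc2 : 2 ≤ c := by nlinarith
  unfold solution_alt
  rw [if_neg (by omega)]
  split_ifs with h
  · -- hp - attack + recovery ≤ attack : exactly one more hit needed, c = 2
    have hc2' : c ≤ 2 := by nlinarith
    omega
  · -- recurse: the ceiling drops by exactly one
    have : -(PySem.Int.floordiv (-(hp - attack + recovery - recovery)) (attack - recovery)) = c - 1 := by
      rw [PySem.Int.neg_floordiv_neg_eq_iff_of_pos hb]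
      constructor <;> nlinarith
    rw [this]; omega

theorem pv_loop_eq (attack recovery : Int) :
    ∀ (fuel : Nat) (hp count : Int), Pre_solution attack recovery hp →
      (solution_alt attack recovery hp).toNat ≤ fuel →
      solutionLoop attack recovery fuel hp count = count + solution_alt attack recovery hp := by
  intro fuel
  induction fuel with
  | zero =>
      intro hp count hpre hfuel
      have := pv_alt_pos attack recovery hp hpre
      omega
  | succ n ih =>
      intro hp count hpre hfuel
      have h1 := pv_alt_pos attack recovery hp hpre
      rw [solutionLoop]
      split_ifs with h
      · -- loop returns count + 1; B returns 1 since hp ≤ attack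
        have : solution_alt attack recovery hp = 1 := by
          unfold solution_alt; rw [if_pos (by omega)]
        omega
      · have hrec : recovery < attack := by
          rcases hpre with h' | h' <;> omega
        have hstep := pv_alt_step attack recovery hp hrec h
        have hpre' : Pre_solution attack recovery (hp - attack + recovery) := Or.inr hrec
        have h1' := pv_alt_pos attack recovery (hp - attack + recovery) hpre'
        rw [ih (hp - attack + recovery) (count + 1) hpre' (by omega)]
        omega

theorem pv_fuel_enough (attack recovery hp : Int) (hdom : Dom_solution attack recovery hp)
    (hpre : Pre_solution attack recovery hp) :
    (solution_alt attack recovery hp).toNat ≤ (hp + 8589934592).toNat := by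
  have hdom' : -2147483648 ≤ hp ∧ hp ≤ 2147483648 ∧ -2147483648 ≤ recovery := by
    unfold Dom_solution pvDomInt at hdom
    simp only [Bool.and_eq_true, decide_eq_true_eq] at hdom
    omega
  unfold solution_alt
  split_ifs with h
  · omega
  · rcases hpre with h' | h'
    · omega
    · have hb : (0:Int) < attack - recovery := by omega
      obtain ⟨h1, h2⟩ := pv_ceil_bounds (hp - recovery) (attack - recovery) hb
      set c := -(PySem.Int.floordiv (-(hp - recovery)) (attack - recovery)) with hc
      have hc1 : 1 ≤ c := by nlinarith
      have : c ≤ hp - recovery := by nlinarith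
      omega

-- ===== VERDICT (by name: the statement is the Claim_ definition above) =====
theorem solution_spec : Claim_equal_solution := by
  intro attack recovery hp hdom hpre
  unfold Spec_solution solution
  rw [pv_loop_eq attack recovery _ hp 0 hpre (pv_fuel_enough attack recovery hp hdom hpre)]
  omega
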